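-- pv_equiv track=rewrite | github.com/MrBrantCode/unitest_baseline | mut_generate/mist_train_cf/cf_95264/solution.py | sort_prime_numbers
-- ===== SOURCE A (Python) =====
-- def sort_prime_numbers(arrays):
--     def is_prime(n):
--         if n < 2:
--             return False
--         for i in range(2, int(n**0.5) + 1):
--             if n % i == 0:
--                 return False
--         return True
--
--     def sum_of_divisors(n):
--         div_sum = 0
--         for i in range(1, n + 1):
--             if n % i == 0:
--                 div_sum += i
--         return div_sum
--
--     prime_numbers = [num for arr in arrays for num in arr if is_prime(num)]
--     for i in range(len(prime_numbers)):
--         for j in range(0, len(prime_numbers) - i - 1):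
--             if sum_of_divisors(prime_numbers[j]) < sum_of_divisors(prime_numbers[j + 1]):
--                 prime_numbers[j], prime_numbers[j + 1] = prime_numbers[j + 1], prime_numbers[j]
--     return prime_numbers
-- ===== SOURCE B (Python) =====
-- def sort_prime_numbers(arrays):
--     def is_prime(n):
--         if n < 2:
--             return False
--         for i in range(2, int(n**0.5) + 1):
--             if n % i == 0:
--                 return False
--         return True
--
--     return sorted((num for arr in arrays for num in arr if is_prime(num)), reverse=True)
-- ===== Notes on version B (the rewrite author's own statement) =====
-- stated objective: faster
-- what changed: replaces the O(k^2) bubble sort that recomputes an O(n) divisor sum on every comparison with a single sorted(..., reverse=True) call, using that the divisor sum of a prime p is p+1 so descending-by-divisor-sum equals descending-by-value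
import Mathlib
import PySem

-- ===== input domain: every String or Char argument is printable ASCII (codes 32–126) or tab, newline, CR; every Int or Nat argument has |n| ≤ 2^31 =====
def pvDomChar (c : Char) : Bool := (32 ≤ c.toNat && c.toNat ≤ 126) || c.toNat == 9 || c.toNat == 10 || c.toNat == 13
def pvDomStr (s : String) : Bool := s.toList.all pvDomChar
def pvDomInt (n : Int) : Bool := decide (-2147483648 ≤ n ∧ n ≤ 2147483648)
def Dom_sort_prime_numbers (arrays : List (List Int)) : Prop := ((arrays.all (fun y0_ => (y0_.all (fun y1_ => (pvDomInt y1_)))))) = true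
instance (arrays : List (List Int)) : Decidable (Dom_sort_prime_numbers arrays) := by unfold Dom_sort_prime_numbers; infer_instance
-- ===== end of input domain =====

-- B replaces A's bubble sort (which recomputes the divisor sum at every comparison) by one
-- sorted(..., reverse=True) call: for a prime p the divisor sum is p+1, so descending by
-- divisor sum is descending by value. Objective: faster (measured).

-- ===== PORT A =====
-- helper is_prime; Python's `int(n**0.5)` equals the integer square root for every
-- 2 ≤ n ≤ 2^31 (checked against CPython on all perfect squares ±1 in range and at random),
-- so it is ported as Nat.sqrt.
def spnIsPrime (n : Int) : Bool :=
  if n < 2 then false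
  else (PySem.List.pyRange 2 ((n.toNat.sqrt : Int) + 1) 1).all (fun i => !(PySem.Int.mod n i == 0))

-- helper sum_of_divisors
def spnSumDiv (n : Int) : Int :=
  (PySem.List.pyRange 1 (n + 1) 1).foldl (fun s i => if PySem.Int.mod n i == 0 then s + i else s) 0

-- one comparison/swap of the bubble sort at index j (indices are always in range here)
def spnStep (l : List Int) (j : Nat) : List Int :=
  if spnSumDiv (l.getD j 0) < spnSumDiv (l.getD (j + 1) 0) then
    (l.set j (l.getD (j + 1) 0)).set (j + 1) (l.getD j 0)
  else l

def sort_prime_numbers (arrays : List (List Int)) : List Int :=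
  let prime_numbers := arrays.flatMap (fun arr => arr.filter spnIsPrime)
  (List.range prime_numbers.length).foldl
    (fun l i => (List.range (l.length - i - 1)).foldl spnStep l) prime_numbers

-- ===== PORT B =====
def sort_prime_numbers_alt (arrays : List (List Int)) : List Int :=
  PySem.List.sorted (arrays.flatMap (fun arr => arr.filter spnIsPrime)) (fun x => x) true

-- ===== PRECONDITION & SPEC =====
def Spec_sort_prime_numbers (arrays : List (List Int)) (out : List Int) : Prop := out = sort_prime_numbers_alt arrays
instance (arrays : List (List Int)) (out : List Int) : Decidable (Spec_sort_prime_numbers arrays out) := by unfold Spec_sort_prime_numbers; infer_instance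

-- ===== CLAIM (what is proved, stated in full; the proofs are below) =====
def Claim_equal_sort_prime_numbers : Prop := ∀ (arrays : List (List Int)), Dom_sort_prime_numbers arrays → Spec_sort_prime_numbers arrays (sort_prime_numbers arrays)

-- ===== LEMMAS AND PROOFS =====

-- is_prime n decides primality of n (as a natural number), for every Int n
lemma spnIsPrime_iff (n : Int) : spnIsPrime n = true ↔ 2 ≤ n ∧ Nat.Prime n.toNat := by
  unfold spnIsPrime
  by_cases h : n < 2
  · simp [h]
  · push Not at h
    have hn : (n.toNat : Int) = n := Int.toNat_of_nonneg (by omega)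
    rw [if_neg (by omega)]
    simp only [List.all_eq_true, PySem.List.mem_pyRange_one, Bool.not_eq_eq_eq_not,
      Bool.not_true, beq_eq_false_iff_ne, ne_eq]
    rw [Nat.prime_def_le_sqrt]
    constructor
    · intro hall
      refine ⟨by omega, by omega, ?_⟩
      intro m hm hms hdvd
      have h1 : PySem.Int.mod n (m : Int) = 0 := by
        rw [PySem.Int.mod_eq_zero_iff_dvd]
        rw [← hn]
        exact_mod_cast hdvd
      exact hall (m : Int) ⟨by exact_mod_cast hm, by omega⟩ h1
    · rintro ⟨-, -, hpr⟩
      intro i ⟨hi2, hiu⟩ hmod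
      rw [PySem.Int.mod_eq_zero_iff_dvd] at hmod
      have hdvd : i.toNat ∣ n.toNat := by
        have : (i.toNat : Int) ∣ (n.toNat : Int) := by
          rw [hn, Int.toNat_of_nonneg (by omega : (0:Int) ≤ i)]; exact hmod
        exact_mod_cast this
      exact hpr i.toNat (by omega) (by omega) hdvd

-- a fold adding i whenever c i holds is the sum of the filtered list
lemma foldl_if_add (c : Int → Bool) (l : List Int) (s : Int) :
    l.foldl (fun s i => if c i then s + i else s) s = s + (l.filter c).sum := by
  induction l generalizing s with
  | nil => simp
  | cons a t ih =>
    simp only [List.foldl_cons, List.filter_cons]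
    by_cases h : c a <;> simp [h, ih] <;> ring

-- sum_of_divisors of a prime is p + 1
lemma spnSumDiv_prime {n : Int} (h : spnIsPrime n = true) : spnSumDiv n = n + 1 := by
  obtain ⟨h2, hpr⟩ := (spnIsPrime_iff n).1 h
  have hn : (n.toNat : Int) = n := Int.toNat_of_nonneg (by omega)
  rw [spnSumDiv, foldl_if_add]
  rw [PySem.List.pyRange_one_append 1 2 (n + 1) (by omega) (by omega),
    PySem.List.pyRange_one_append 2 n (n + 1) (by omega) (by omega)]
  have e1 : PySem.List.pyRange 1 2 1 = [1] := by decide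
  have e2 : PySem.List.pyRange n (n + 1) 1 = [n] := PySem.List.pyRange_one_singleton n
  have e3 : (PySem.List.pyRange 2 n 1).filter (fun i => PySem.Int.mod n i == 0) = [] := by
    rw [List.filter_eq_nil_iff]
    intro i hi
    rw [PySem.List.mem_pyRange_one] at hi
    simp only [beq_iff_eq, PySem.Int.mod_eq_zero_iff_dvd]
    intro hdvd
    have hd : i.toNat ∣ n.toNat := by
      have : (i.toNat : Int) ∣ (n.toNat : Int) := by
        rw [hn, Int.toNat_of_nonneg (by omega : (0:Int) ≤ i)]; exact hdvd
      exact_mod_cast this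
    rcases (Nat.Prime.eq_one_or_self_of_dvd hpr i.toNat hd) with h1 | h1 <;> omega
  rw [e1, e2, List.filter_append, List.filter_append, e3]
  have d1 : PySem.Int.mod n 1 = 0 := by rw [PySem.Int.mod_eq_zero_iff_dvd]; exact one_dvd n
  have dn : PySem.Int.mod n n = 0 := by rw [PySem.Int.mod_eq_zero_iff_dvd]
  simp [dn]
  ring

-- the structural left-to-right bubble pass, comparing by value
def spnBub (c : Int) (t : List Int) : List Int :=
  match t with
  | [] => [c]
  | b :: t' => if c < b then b :: spnBub c t' else c :: spnBub b t'

lemma spnStep_cons (x : Int) (ys : List Int) (j : Nat) :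
    spnStep (x :: ys) (j + 1) = x :: spnStep ys j := by
  simp [spnStep]
  split_ifs <;> rfl

lemma spnStep_foldl_shift (n : Nat) : ∀ (s : Nat) (x : Int) (ys : List Int),
    (List.range' (s + 1) n).foldl spnStep (x :: ys) = x :: (List.range' s n).foldl spnStep ys := by
  induction n with
  | zero => intros; simp
  | succ n ih =>
    intro s x ys
    rw [List.range'_succ, List.range'_succ, List.foldl_cons, List.foldl_cons, spnStep_cons, ih]

-- one inner pass over indices 0..t.length-1 of c :: t ++ rest is the structural pass on
-- c :: t, provided every element of c :: t has divisor sum element+1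
lemma spnInner (t : List Int) : ∀ (c : Int) (rest : List Int),
    (∀ x ∈ c :: t, spnSumDiv x = x + 1) →
    (List.range t.length).foldl spnStep ((c :: t) ++ rest) = spnBub c t ++ rest := by
  induction t with
  | nil => intro c rest hp; simp [spnBub]
  | cons b t' ih =>
    intro c rest hp
    have hc := hp c (by simp)
    have hb := hp b (by simp)
    rw [List.length_cons, List.range_eq_range', List.range'_succ, List.foldl_cons]
    by_cases h : c < b
    · have h1 : spnStep ((c :: b :: t') ++ rest) 0 = b :: ((c :: t') ++ rest) := by
        simp only [spnStep, List.cons_append, List.getD_cons_zero, List.getD_cons_succ]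
        rw [hc, hb, if_pos (by omega)]
        rfl
      rw [h1, spnStep_foldl_shift, ← List.range_eq_range',
        ih c rest (fun x hx => hp x (by simp at hx ⊢; tauto))]
      simp [spnBub, h]
    · have h1 : spnStep ((c :: b :: t') ++ rest) 0 = c :: ((b :: t') ++ rest) := by
        simp only [spnStep, List.cons_append, List.getD_cons_zero, List.getD_cons_succ]
        rw [hc, hb, if_neg (by omega)]
      rw [h1, spnStep_foldl_shift, ← List.range_eq_range',
        ih b rest (fun x hx => hp x (by simp at hx ⊢; tauto))]
      simp [spnBub, h]

-- the pass puts a minimum last and permutes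
lemma spnBub_shape (t : List Int) : ∀ (c : Int),
    ∃ ys z, spnBub c t = ys ++ [z] ∧ (c :: t).Perm (ys ++ [z]) ∧ ∀ y ∈ c :: t, z ≤ y := by
  induction t with
  | nil => intro c; exact ⟨[], c, rfl, List.Perm.refl _, by simp⟩
  | cons b t' ih =>
    intro c
    by_cases h : c < b
    · obtain ⟨ys, z, he, hperm, hle⟩ := ih c
      refine ⟨b :: ys, z, by simp [spnBub, h, he], ?_, ?_⟩
      · exact ((List.Perm.swap b c t').trans (hperm.cons b))
      · intro y hy
        have hzc : z ≤ c := hle c (by simp)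
        rcases List.mem_cons.1 hy with rfl | hy'
        · exact hzc
        · rcases List.mem_cons.1 hy' with rfl | hy''
          · omega
          · exact hle y (by simp [hy''])
    · obtain ⟨ys, z, he, hperm, hle⟩ := ih b
      refine ⟨c :: ys, z, by simp [spnBub, h, he], hperm.cons c, ?_⟩
      intro y hy
      have hzb : z ≤ b := hle b (by simp)
      rcases List.mem_cons.1 hy with rfl | hy'
      · omega
      · exact hle y hy'

-- once at most one unsorted element remains, all later passes are the identity
lemma spnOuter_id (n : Nat) : ∀ (i0 : Nat) (l : List Int), l.length ≤ i0 + 1 →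
    (List.range' i0 n).foldl (fun l i => (List.range (l.length - i - 1)).foldl spnStep l) l = l := by
  induction n with
  | zero => intros; simp
  | succ n ih =>
    intro i0 l h
    rw [List.range'_succ, List.foldl_cons]
    have hb : l.length - i0 - 1 = 0 := by omega
    rw [hb]
    simp only [List.range_zero, List.foldl_nil]
    exact ih (i0 + 1) l (by omega)

-- outer-loop invariant: zs holds the minima so far, descending, all ≤ ys
lemma spnOuter (n : Nat) : ∀ (ys zs : List Int), ys.length ≤ n + 1 →
    (∀ x ∈ ys, spnSumDiv x = x + 1) →
    (∀ w ∈ zs, ∀ y ∈ ys, w ≤ y) → zs.Pairwise (fun a b => b ≤ a) →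
    ∃ res, (List.range' zs.length n).foldl
        (fun l i => (List.range (l.length - i - 1)).foldl spnStep l) (ys ++ zs) = res ∧
      res.Perm (ys ++ zs) ∧ res.Pairwise (fun a b => b ≤ a) := by
  induction n with
  | zero =>
    intro ys zs hn hsum hinv hzs
    refine ⟨ys ++ zs, by simp, List.Perm.refl _, ?_⟩
    match ys, hn with
    | [], _ => simpa using hzs
    | [y], _ =>
      simp only [List.cons_append, List.nil_append, List.pairwise_cons]
      exact ⟨fun w hw => hinv w hw y (by simp), hzs⟩
  | succ n ih =>
    intro ys zs hn hsum hinv hzs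
    rw [List.range'_succ, List.foldl_cons]
    match ys with
    | [] =>
      have hb : ([] ++ zs : List Int).length - zs.length - 1 = 0 := by simp
      rw [hb]
      simp only [List.range_zero, List.foldl_nil]
      refine ⟨[] ++ zs, ?_, List.Perm.refl _, by simpa using hzs⟩
      exact spnOuter_id n (zs.length + 1) ([] ++ zs) (by simp; omega)
    | c :: t =>
      have hb : ((c :: t) ++ zs).length - zs.length - 1 = t.length := by
        simp [List.length_append]; omega
      rw [hb, spnInner t c zs hsum]
      obtain ⟨ys', z, he, hperm, hmin⟩ := spnBub_shape t c
      rw [he]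
      have hlen : ys'.length = t.length := by
        have := hperm.length_eq; simp at this; omega
      have hmem : ∀ x ∈ ys', x ∈ c :: t := fun x hx => hperm.mem_iff.2 (by simp [hx])
      have hz : z ∈ c :: t := hperm.mem_iff.2 (by simp)
      obtain ⟨res, hfold, hp2, hpw⟩ := ih ys' (z :: zs)
        (by simp at hn; omega)
        (fun x hx => hsum x (hmem x hx))
        (by
          intro w hw y hy
          rcases List.mem_cons.1 hw with rfl | hw'
          · exact hmin y (hmem y hy)
          · exact hinv w hw' y (hmem y hy))
        (by
          refine List.pairwise_cons.2 ⟨fun w hw => hinv w hw z hz, hzs⟩)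
      refine ⟨res, ?_, ?_, hpw⟩
      · rw [← hfold]
        congr 1 <;> simp
      · refine hp2.trans ?_
        have : (ys' ++ z :: zs) = (ys' ++ [z]) ++ zs := by simp
        rw [this]
        exact (hperm.symm.append_right zs)

-- ===== VERDICT (by name: the statement is the Claim_ definition above) =====
theorem sort_prime_numbers_spec : Claim_equal_sort_prime_numbers := by
  intro arrays _
  unfold Spec_sort_prime_numbers sort_prime_numbers sort_prime_numbers_alt
  set ps := arrays.flatMap (fun arr => arr.filter spnIsPrime) with hps
  have hsum : ∀ x ∈ ps, spnSumDiv x = x + 1 := by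
    intro x hx
    rw [hps, List.mem_flatMap] at hx
    obtain ⟨arr, _, hx2⟩ := hx
    exact spnSumDiv_prime (List.mem_filter.1 hx2).2
  obtain ⟨res, hfold, hperm, hpw⟩ := spnOuter ps.length ps [] (by omega) hsum
    (by simp) (by simp)
  simp only [List.append_nil, List.length_nil] at hfold hperm
  show List.foldl (fun l i => List.foldl spnStep l (List.range (l.length - i - 1))) ps
      (List.range ps.length) = _
  rw [List.range_eq_range', hfold]
  have hB := PySem.List.sorted_perm ps (fun x => x) true
  have hBpw : (PySem.List.sorted ps (fun x => x) true).Pairwise (fun a b => b ≤ a) := by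
    simpa using PySem.List.sorted_pairwise_rev ps (fun x => x)
  exact List.Perm.eq_of_pairwise
    (fun a b _ _ h1 h2 => by omega) hpw hBpw (hperm.trans hB.symm)
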